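-- pv_equiv track=rewrite | github.com/Barankynk/turkce_spam | src/preprocessing.py | turkish_stemming
-- ===== SOURCE A (Python) =====
-- def turkish_stemming(text: str) -> str:
--     """
--     Türkçe kelimeleri köklerine indirgeme (basit kurallar).
--
--     Not: Bu basit bir fallback. advanced_turkish_stemming tercih edilmeli.
--
--     Args:
--         text: Metin
--
--     Returns:
--         Köklerine indirgenmiş metin
--     """
--     # Yaygın Türkçe ekler (konservatif liste - tek harfliler çıkarıldı)
--     suffixes = [
--         'lar', 'ler', 'lik', 'lık', 'luk', 'lük',
--         'da', 'de', 'ta', 'te', 'dan', 'den', 'tan', 'ten',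
--         'nın', 'nin', 'nun', 'nün', 'ın', 'in', 'un', 'ün',
--         'na', 'ne',
--         'dır', 'dir', 'dur', 'dür', 'tır', 'tir', 'tur', 'tür',
--         'mış', 'miş', 'muş', 'müş',
--         'yor', 'ıyor', 'iyor', 'uyor', 'üyor'
--     ]
--
--     words = text.split()
--     stemmed_words = []
--
--     for word in words:
--         if len(word) > 5:  # Sadece uzun kelimelere dokun
--             for suffix in sorted(suffixes, key=len, reverse=True):
--                 if word.endswith(suffix):
--                     # Kökün en az 3 karakter olmasını sağla
--                     if len(word) - len(suffix) >= 3: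
--                         word = word[:-len(suffix)]
--                         break
--         stemmed_words.append(word)
--
--     return ' '.join(stemmed_words)
-- ===== SOURCE B (Python) =====
-- # Reversed-suffix prefix automaton: walk each word's characters from the end once,
-- # pruning with a prefix set, keeping the longest matched suffix whose root stays >= 3 chars.
-- _SUFFIXES = [
--     'lar', 'ler', 'lik', 'lık', 'luk', 'lük',
--     'da', 'de', 'ta', 'te', 'dan', 'den', 'tan', 'ten',
--     'nın', 'nin', 'nun', 'nün', 'ın', 'in', 'un', 'ün',
--     'na', 'ne',
--     'dır', 'dir', 'dur', 'dür', 'tır', 'tir', 'tur', 'tür',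
--     'mış', 'miş', 'muş', 'müş',
--     'yor', 'ıyor', 'iyor', 'uyor', 'üyor'
-- ]
-- _REV = {s[::-1] for s in _SUFFIXES}
-- _PREFIXES = {r[:i] for r in _REV for i in range(1, len(r) + 1)}
--
--
-- def turkish_stemming(text: str) -> str:
--     out = []
--     for word in text.split():
--         if len(word) > 5:
--             best = 0
--             p = ''
--             for ch in word[::-1]:
--                 p = p + ch
--                 if p not in _PREFIXES:
--                     break
--                 if p in _REV and len(word) - len(p) >= 3:
--                     best = len(p)
--             if best:
--                 word = word[:-best]
--         out.append(word)
--     return ' '.join(out)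
-- ===== Notes on version B (the rewrite author's own statement) =====
-- stated objective: alternative
-- what changed: Instead of re-sorting and scanning the 41-entry suffix list with endswith for each word, B precomputes the set of reversed suffixes and the set of their nonempty prefixes, then walks each word's characters from the end once, pruning the walk when the growing reversed tail is no longer a prefix of any reversed suffix and keeping the longest matched suffix that leaves a root of >= 3 chars.
import Mathlib
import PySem

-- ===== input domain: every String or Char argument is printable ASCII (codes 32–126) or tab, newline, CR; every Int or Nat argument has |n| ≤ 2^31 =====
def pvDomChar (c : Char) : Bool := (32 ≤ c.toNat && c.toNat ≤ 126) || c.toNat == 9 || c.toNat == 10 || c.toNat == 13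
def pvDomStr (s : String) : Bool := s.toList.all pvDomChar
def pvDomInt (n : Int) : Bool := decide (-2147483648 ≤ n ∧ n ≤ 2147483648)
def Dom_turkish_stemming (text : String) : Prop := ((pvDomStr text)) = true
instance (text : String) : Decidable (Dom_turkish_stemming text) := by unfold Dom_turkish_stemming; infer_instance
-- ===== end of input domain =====

-- B replaces A's per-word scan of the length-sorted suffix list by a reversed-suffix prefix
-- automaton: it walks each word's characters from the end once, pruning with a prefix set and
-- keeping the longest matched suffix whose root stays ≥ 3 chars (alternative re-implementation;
-- same return value everywhere).

-- ===== PORT A =====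
def pvSuffixes : List String :=
  ["lar", "ler", "lik", "lık", "luk", "lük",
   "da", "de", "ta", "te", "dan", "den", "tan", "ten",
   "nın", "nin", "nun", "nün", "ın", "in", "un", "ün",
   "na", "ne",
   "dır", "dir", "dur", "dür", "tır", "tir", "tur", "tür",
   "mış", "miş", "muş", "müş",
   "yor", "ıyor", "iyor", "uyor", "üyor"]

-- the inner 'for suffix in sorted(...)' loop of A, with its break/continue structure
def pvLoopA : List String → String → String
  | [], w => w
  | s :: rest, w =>
    if PySem.Str.endswith w s then
      if PySem.Str.len w - PySem.Str.len s ≥ 3 then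
        PySem.Str.slice w none (some (-(PySem.Str.len s)))
      else pvLoopA rest w
    else pvLoopA rest w

def pvStemA (w : String) : String :=
  if PySem.Str.len w > 5 then
    pvLoopA (PySem.List.sorted pvSuffixes (fun s => PySem.Str.len s) true) w
  else w

def turkish_stemming (text : String) : String :=
  PySem.Str.join " " ((PySem.Str.split₀ text).map pvStemA)

-- ===== PORT B =====
-- _REV = {s[::-1] for s in _SUFFIXES}   (s[::-1] ported as list reversal, exact)
def pvRevSuf : PySem.Set String :=
  PySem.Set.ofList (pvSuffixes.map (fun s => String.ofList s.toList.reverse))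

-- _PREFIXES = {r[:i] for r in _REV for i in range(1, len(r) + 1)}
def pvPrefixes : PySem.Set String :=
  PySem.Set.ofList (pvRevSuf.flatMap (fun r =>
    (PySem.List.pyRange 1 (PySem.Str.len r + 1) 1).map (fun i => PySem.Str.slice r none (some i))))

-- the inner 'for ch in word[::-1]' walk of B (wlen = len(word); break returns best)
def pvWalkB (wlen : Int) : List Char → String → Int → Int
  | [], _, best => best
  | c :: cs, p₀, best =>
    let p := p₀ ++ String.singleton c
    if PySem.Set.contains pvPrefixes p = false then best
    else
      pvWalkB wlen cs p
        (if PySem.Set.contains pvRevSuf p = true ∧ wlen - PySem.Str.len p ≥ 3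
         then PySem.Str.len p else best)

def pvStemB (w : String) : String :=
  if PySem.Str.len w > 5 then
    let best := pvWalkB (PySem.Str.len w) w.toList.reverse "" 0
    if best ≠ 0 then PySem.Str.slice w none (some (-best)) else w
  else w

def turkish_stemming_alt (text : String) : String :=
  PySem.Str.join " " ((PySem.Str.split₀ text).map pvStemB)

-- ===== PRECONDITION & SPEC =====
def Spec_turkish_stemming (text : String) (out : String) : Prop := out = turkish_stemming_alt text
instance (text : String) (out : String) : Decidable (Spec_turkish_stemming text out) := by unfold Spec_turkish_stemming; infer_instance

-- ===== CLAIM (what is proved, stated in full; the proofs are below) =====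
def Claim_equal_turkish_stemming : Prop := ∀ (text : String), Dom_turkish_stemming text → Spec_turkish_stemming text (turkish_stemming text)

-- ===== LEMMAS AND PROOFS =====

-- the three length groups of the suffix list
def pvG4 : List String := ["ıyor", "iyor", "uyor", "üyor"]
def pvG3 : List String :=
  ["lar", "ler", "lik", "lık", "luk", "lük", "dan", "den", "tan", "ten",
   "nın", "nin", "nun", "nün", "dır", "dir", "dur", "dür", "tır", "tir",
   "tur", "tür", "mış", "miş", "muş", "müş", "yor"]
def pvG2 : List String := ["da", "de", "ta", "te", "ın", "in", "un", "ün", "na", "ne"]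

-- A's sorted(suffixes, key=len, reverse=True): lengths 4, 3, 2, stable within each length
theorem pvSorted_eq :
    PySem.List.sorted pvSuffixes (fun s => PySem.Str.len s) true =
      pvG4 ++ (pvG3 ++ (pvG2 ++ [])) := by
  decide

-- w ends with s  ↔  w[-|s|:] = s  (when 0 < |s|)
theorem pvEndswith_iff_tail (w s : String) (L : Nat) (hL : 0 < L)
    (hs : s.toList.length = L) :
    PySem.Str.endswith w s = true ↔ PySem.Str.slice w (some (-(L : Int))) none = s := by
  rw [PySem.Str.endswith_eq, PySem.Chars.endswith_iff, ← String.toList_inj,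
    PySem.Str.toList_slice, PySem.Chars.slice_eq_listSlice,
    PySem.List.slice_from_neg_natCast _ L hL]
  constructor
  · rintro ⟨t, ht⟩
    have hlen : w.toList.length - L = t.length := by
      rw [← ht, List.length_append, hs]; omega
    rw [hlen, ← ht, List.drop_left]
  · intro h
    rw [← h]
    exact List.drop_suffix _ _

-- one length-group of A's scan collapses to a single tail test
theorem pvLoopA_group (L : Nat) (hL : 0 < L) (G rest : List String) (w : String)
    (hG : ∀ s ∈ G, s.toList.length = L) :
    pvLoopA (G ++ rest) w =
      if PySem.Str.slice w (some (-(L : Int))) none ∈ G ∧ 3 ≤ (w.toList.length : Int) - L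
      then PySem.Str.slice w none (some (-(L : Int)))
      else pvLoopA rest w := by
  induction G with
  | nil => simp
  | cons s G ih =>
    have hs : s.toList.length = L := hG s (List.mem_cons_self)
    have hG' : ∀ x ∈ G, x.toList.length = L := fun x hx => hG x (List.mem_cons_of_mem _ hx)
    have hlen : PySem.Str.len s = (L : Int) := by rw [PySem.Str.len_eq, hs]
    rw [List.cons_append]
    show (if PySem.Str.endswith w s = true then _ else _) = _
    by_cases htail : PySem.Str.slice w (some (-(L : Int))) none = s
    · have hend : PySem.Str.endswith w s = true :=
        (pvEndswith_iff_tail w s L hL hs).mpr htail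
      rw [if_pos hend, hlen, PySem.Str.len_eq]
      by_cases hroot : 3 ≤ (w.toList.length : Int) - L
      · rw [if_pos hroot, if_pos ⟨htail ▸ List.mem_cons_self, hroot⟩]
      · rw [if_neg hroot, ih hG', if_neg (fun hc => hroot hc.2), if_neg (fun hc => hroot hc.2)]
    · have hend : ¬ PySem.Str.endswith w s = true := by
        rw [pvEndswith_iff_tail w s L hL hs]; exact htail
      rw [if_neg hend, ih hG']
      by_cases hmem : PySem.Str.slice w (some (-(L : Int))) none ∈ G ∧ 3 ≤ (w.toList.length : Int) - L
      · rw [if_pos hmem, if_pos ⟨List.mem_cons_of_mem _ hmem.1, hmem.2⟩]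
      · rw [if_neg hmem, if_neg (fun hc => hmem ⟨(List.mem_cons.mp hc.1).resolve_left htail, hc.2⟩)]

theorem pvBool_false {b : Bool} (h : ¬ b = true) : b = false := by
  cases b
  · rfl
  · exact absurd rfl h

theorem pvLen_ofList (l : List Char) : PySem.Str.len (String.ofList l) = (l.length : Int) := by
  simp [PySem.Str.len_eq]

-- membership in the reversed-suffix set is membership of the reverse in the suffix list
theorem pvMemRev_iff (l : List Char) :
    PySem.Set.contains pvRevSuf (String.ofList l) = true ↔ String.ofList l.reverse ∈ pvSuffixes := by
  rw [pvRevSuf, PySem.Set.contains_iff, PySem.Set.mem_ofList, List.mem_map]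
  constructor
  · rintro ⟨s, hsm, hse⟩
    have hrev : s.toList.reverse = l := by
      have := congrArg String.toList hse; simpa using this
    have hs : s = String.ofList l.reverse := by
      apply String.toList_inj.mp; simp [← hrev]
    exact hs ▸ hsm
  · intro hm
    exact ⟨String.ofList l.reverse, hm, by apply String.toList_inj.mp; simp⟩

theorem pvSuffixes_perm : pvSuffixes.Perm (pvG4 ++ (pvG3 ++ (pvG2 ++ []))) := by
  have h := PySem.List.sorted_perm pvSuffixes (fun s => PySem.Str.len s) true
  rw [pvSorted_eq] at h
  exact h.symm

theorem pvLenG4 : ∀ s ∈ pvG4, s.toList.length = 4 := by decide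
theorem pvLenG3 : ∀ s ∈ pvG3, s.toList.length = 3 := by decide
theorem pvLenG2 : ∀ s ∈ pvG2, s.toList.length = 2 := by decide
theorem pvSufLen_le : ∀ s ∈ pvSuffixes, s.toList.length ≤ 4 := by decide

-- membership in pvRevSuf by the prefix's length
theorem pvMemRev4 (l : List Char) (h : l.length = 4) :
    PySem.Set.contains pvRevSuf (String.ofList l) = true ↔ String.ofList l.reverse ∈ pvG4 := by
  rw [pvMemRev_iff, pvSuffixes_perm.mem_iff]
  have hlen : (String.ofList l.reverse).toList.length = 4 := by simp [h]
  simp only [List.mem_append, List.not_mem_nil, or_false]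
  constructor
  · rintro (h4 | h3 | h2)
    · exact h4
    · have := pvLenG3 _ h3; omega
    · have := pvLenG2 _ h2; omega
  · exact fun hm => Or.inl hm

theorem pvMemRev3 (l : List Char) (h : l.length = 3) :
    PySem.Set.contains pvRevSuf (String.ofList l) = true ↔ String.ofList l.reverse ∈ pvG3 := by
  rw [pvMemRev_iff, pvSuffixes_perm.mem_iff]
  have hlen : (String.ofList l.reverse).toList.length = 3 := by simp [h]
  simp only [List.mem_append, List.not_mem_nil, or_false]
  constructor
  · rintro (h4 | h3 | h2)
    · have := pvLenG4 _ h4; omega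
    · exact h3
    · have := pvLenG2 _ h2; omega
  · exact fun hm => Or.inr (Or.inl hm)

theorem pvMemRev2 (l : List Char) (h : l.length = 2) :
    PySem.Set.contains pvRevSuf (String.ofList l) = true ↔ String.ofList l.reverse ∈ pvG2 := by
  rw [pvMemRev_iff, pvSuffixes_perm.mem_iff]
  have hlen : (String.ofList l.reverse).toList.length = 2 := by simp [h]
  simp only [List.mem_append, List.not_mem_nil, or_false]
  constructor
  · rintro (h4 | h3 | h2)
    · have := pvLenG4 _ h4; omega
    · have := pvLenG3 _ h3; omega
    · exact h2
  · exact fun hm => Or.inr (Or.inr hm)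

-- no length-1 reversed suffix
theorem pvMemRev1 (c : Char) : PySem.Set.contains pvRevSuf (String.ofList [c]) = false := by
  cases hb : PySem.Set.contains pvRevSuf (String.ofList [c]) with
  | false => rfl
  | true =>
    exfalso
    have hm := (pvMemRev_iff [c]).mp hb
    rw [pvSuffixes_perm.mem_iff] at hm
    simp only [List.mem_append, List.not_mem_nil, or_false] at hm
    have hlen : (String.ofList [c].reverse).toList.length = 1 := by simp
    rcases hm with h4 | h3 | h2
    · have := pvLenG4 _ h4; omega
    · have := pvLenG3 _ h3; omega
    · have := pvLenG2 _ h2; omega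

-- a nonempty prefix (take k) of a word of pvRevSuf is in pvPrefixes
theorem pvMemPrefix_of_take (l : List Char) (k : Nat) (h1 : 1 ≤ k) (hk : k ≤ l.length)
    (hR : PySem.Set.contains pvRevSuf (String.ofList l) = true) :
    PySem.Set.contains pvPrefixes (String.ofList (l.take k)) = true := by
  rw [PySem.Set.contains_iff] at hR ⊢
  rw [pvPrefixes, PySem.Set.mem_ofList, List.mem_flatMap]
  refine ⟨String.ofList l, hR, ?_⟩
  rw [List.mem_map]
  refine ⟨(k : Int), ?_, ?_⟩
  · rw [PySem.List.mem_pyRange_one]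
    constructor
    · exact_mod_cast h1
    · rw [pvLen_ofList]
      exact_mod_cast Nat.lt_succ_of_le hk
  · apply String.toList_inj.mp
    simp [PySem.Chars.slice_eq_listSlice, PySem.List.slice_to_natCast]

theorem pvMemPrefix_of_append (l₁ l₂ : List Char) (h1 : 1 ≤ l₁.length)
    (hR : PySem.Set.contains pvRevSuf (String.ofList (l₁ ++ l₂)) = true) :
    PySem.Set.contains pvPrefixes (String.ofList l₁) = true := by
  have h := pvMemPrefix_of_take (l₁ ++ l₂) l₁.length h1
    (by rw [List.length_append]; omega) hR
  rwa [List.take_left] at h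

-- every element of pvPrefixes has length ≤ 4
theorem pvMemPrefix_len_le (p : String)
    (h : PySem.Set.contains pvPrefixes p = true) : p.toList.length ≤ 4 := by
  rw [PySem.Set.contains_iff, pvPrefixes, PySem.Set.mem_ofList, List.mem_flatMap] at h
  obtain ⟨r, hr, hmap⟩ := h
  rw [List.mem_map] at hmap
  obtain ⟨i, hi, hslice⟩ := hmap
  have hrlen : r.toList.length ≤ 4 := by
    rw [pvRevSuf, PySem.Set.mem_ofList, List.mem_map] at hr
    obtain ⟨s, hs, he⟩ := hr
    have hle := pvSufLen_le s hs
    have ht : r.toList = s.toList.reverse := by rw [← he]; simp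
    rw [ht, List.length_reverse]; exact hle
  obtain ⟨hi1, hi2⟩ := (PySem.List.mem_pyRange_one ..).mp hi
  have h0 : i = ((i.toNat : Nat) : Int) := (Int.toNat_of_nonneg (by omega)).symm
  have hp : p.toList = r.toList.take i.toNat := by
    rw [← hslice, PySem.Str.toList_slice, PySem.Chars.slice_eq_listSlice, h0,
      PySem.List.slice_to_natCast]
    simp
    omega
  rw [hp]
  calc (r.toList.take i.toNat).length ≤ r.toList.length := by
        rw [List.length_take]; omega
    _ ≤ 4 := hrlen

-- walk unfoldings
theorem pvWalk_stop (L best : Int) (p : String) (c : Char) (cs : List Char)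
    (h : PySem.Set.contains pvPrefixes (p ++ String.singleton c) = false) :
    pvWalkB L (c :: cs) p best = best := by
  simp only [pvWalkB]
  rw [h]
  simp

theorem pvWalk_step (L best : Int) (p : String) (c : Char) (cs : List Char)
    (h : PySem.Set.contains pvPrefixes (p ++ String.singleton c) = true) :
    pvWalkB L (c :: cs) p best =
      pvWalkB L cs (p ++ String.singleton c)
        (if PySem.Set.contains pvRevSuf (p ++ String.singleton c) = true ∧
            L - PySem.Str.len (p ++ String.singleton c) ≥ 3
         then PySem.Str.len (p ++ String.singleton c) else best) := by
  simp only [pvWalkB]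
  rw [h]
  simp

-- once p has length 4 the walk can only stop (no prefix has length 5)
theorem pvWalk_end (L best : Int) (p : String) (hp : p.toList.length = 4) (cs : List Char) :
    pvWalkB L cs p best = best := by
  cases cs with
  | nil => rfl
  | cons c cs' =>
    apply pvWalk_stop
    cases hb : PySem.Set.contains pvPrefixes (p ++ String.singleton c) with
    | false => rfl
    | true =>
      have hle := pvMemPrefix_len_le _ hb
      simp [hp] at hle

-- per-word agreement of the two stemmers
set_option maxRecDepth 8192 in
theorem pvStem_eq (w : String) : pvStemA w = pvStemB w := by
  simp only [pvStemA, pvStemB]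
  by_cases h : PySem.Str.len w > 5
  · have hw : 5 < w.toList.length := by
      rw [PySem.Str.len_eq] at h; exact_mod_cast h
    rw [if_pos h, if_pos h, pvSorted_eq,
      pvLoopA_group 4 (by norm_num) _ _ w pvLenG4,
      pvLoopA_group 3 (by norm_num) _ _ w pvLenG3,
      pvLoopA_group 2 (by norm_num) _ _ w pvLenG2]
    -- decompose the reversed word: length > 5 so at least four characters
    have hlenrev : 4 ≤ w.toList.reverse.length := by rw [List.length_reverse]; omega
    obtain ⟨c1, r1, e1⟩ := List.exists_cons_of_ne_nil
      (l := w.toList.reverse) (by intro hnil; rw [hnil] at hlenrev; simp at hlenrev)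
    obtain ⟨c2, r2, e2⟩ := List.exists_cons_of_ne_nil (l := r1)
      (by intro hnil; rw [e1, hnil] at hlenrev; simp at hlenrev)
    obtain ⟨c3, r3, e3⟩ := List.exists_cons_of_ne_nil (l := r2)
      (by intro hnil; rw [e1, e2, hnil] at hlenrev; simp at hlenrev)
    obtain ⟨c4, rest, e4⟩ := List.exists_cons_of_ne_nil (l := r3)
      (by intro hnil; rw [e1, e2, e3, hnil] at hlenrev; simp at hlenrev)
    have hrev : w.toList.reverse = c1 :: c2 :: c3 :: c4 :: rest := by rw [e1, e2, e3, e4]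
    have hw4 : w.toList = rest.reverse ++ [c4, c3, c2, c1] := by
      have h0 : w.toList = (c1 :: c2 :: c3 :: c4 :: rest).reverse := by rw [← hrev]; simp
      simpa using h0
    set Lw := PySem.Str.len w with hLw
    have hLwi : Lw = (w.toList.length : Int) := by rw [hLw]; exact PySem.Str.len_eq w
    -- tails of w as literals over c1..c4
    have ht4 : PySem.Str.slice w (some (-((4 : Nat) : Int))) none = String.ofList [c4, c3, c2, c1] := by
      apply String.toList_inj.mp
      rw [PySem.Str.toList_slice, PySem.Chars.slice_eq_listSlice,
        PySem.List.slice_from_neg_natCast _ 4 (by norm_num), hw4]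
      have hlen4 : (rest.reverse ++ [c4, c3, c2, c1]).length - 4 = rest.reverse.length := by
        rw [List.length_append]; simp
      rw [hlen4, List.drop_left]
      simp
    have ht3 : PySem.Str.slice w (some (-((3 : Nat) : Int))) none = String.ofList [c3, c2, c1] := by
      apply String.toList_inj.mp
      rw [PySem.Str.toList_slice, PySem.Chars.slice_eq_listSlice,
        PySem.List.slice_from_neg_natCast _ 3 (by norm_num),
        show w.toList = (rest.reverse ++ [c4]) ++ [c3, c2, c1] by rw [hw4]; simp]
      have hlen3 : ((rest.reverse ++ [c4]) ++ [c3, c2, c1]).length - 3 = (rest.reverse ++ [c4]).length := by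
        rw [List.length_append]; simp
      rw [hlen3, List.drop_left]
      simp
    have ht2 : PySem.Str.slice w (some (-((2 : Nat) : Int))) none = String.ofList [c2, c1] := by
      apply String.toList_inj.mp
      rw [PySem.Str.toList_slice, PySem.Chars.slice_eq_listSlice,
        PySem.List.slice_from_neg_natCast _ 2 (by norm_num),
        show w.toList = (rest.reverse ++ [c4, c3]) ++ [c2, c1] by rw [hw4]; simp]
      have hlen2 : ((rest.reverse ++ [c4, c3]) ++ [c2, c1]).length - 2 = (rest.reverse ++ [c4, c3]).length := by
        rw [List.length_append]; simp
      rw [hlen2, List.drop_left]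
      simp
    -- membership bridges at lengths 4, 3, 2
    have hM4 : PySem.Set.contains pvRevSuf (String.ofList [c1, c2, c3, c4]) = true ↔
        String.ofList [c4, c3, c2, c1] ∈ pvG4 := by
      have h0 := pvMemRev4 [c1, c2, c3, c4] (by simp)
      simpa using h0
    have hM3 : PySem.Set.contains pvRevSuf (String.ofList [c1, c2, c3]) = true ↔
        String.ofList [c3, c2, c1] ∈ pvG3 := by
      have h0 := pvMemRev3 [c1, c2, c3] (by simp)
      simpa using h0
    have hM2 : PySem.Set.contains pvRevSuf (String.ofList [c1, c2]) = true ↔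
        String.ofList [c2, c1] ∈ pvG2 := by
      have h0 := pvMemRev2 [c1, c2] (by simp)
      simpa using h0
    -- append and length literals
    have ha1 : ("" : String) ++ String.singleton c1 = String.ofList [c1] := by
      apply String.toList_inj.mp; simp
    have ha2 : String.ofList [c1] ++ String.singleton c2 = String.ofList [c1, c2] := by
      apply String.toList_inj.mp; simp
    have ha3 : String.ofList [c1, c2] ++ String.singleton c3 = String.ofList [c1, c2, c3] := by
      apply String.toList_inj.mp; simp
    have ha4 : String.ofList [c1, c2, c3] ++ String.singleton c4 = String.ofList [c1, c2, c3, c4] := by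
      apply String.toList_inj.mp; simp
    have hl2 : PySem.Str.len (String.ofList [c1, c2]) = (2 : Int) := by
      rw [pvLen_ofList]; norm_num
    have hl3 : PySem.Str.len (String.ofList [c1, c2, c3]) = (3 : Int) := by
      rw [pvLen_ofList]; norm_num
    have hl4 : PySem.Str.len (String.ofList [c1, c2, c3, c4]) = (4 : Int) := by
      rw [pvLen_ofList]; norm_num
    -- evaluate B's walk to a nested-if normal form
    have hbest : pvWalkB Lw (c1 :: c2 :: c3 :: c4 :: rest) "" 0 =
        (if PySem.Set.contains pvRevSuf (String.ofList [c1, c2, c3, c4]) = true ∧ Lw - 4 ≥ 3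
         then 4
         else if PySem.Set.contains pvRevSuf (String.ofList [c1, c2, c3]) = true ∧ Lw - 3 ≥ 3
         then 3
         else if PySem.Set.contains pvRevSuf (String.ofList [c1, c2]) = true ∧ Lw - 2 ≥ 3
         then 2 else 0) := by
      by_cases hq1 : PySem.Set.contains pvPrefixes (String.ofList [c1]) = true
      · rw [pvWalk_step Lw 0 "" c1 _ (by rw [ha1]; exact hq1), ha1, pvMemRev1 c1,
          if_neg (fun hc => Bool.false_ne_true hc.1)]
        by_cases hq2 : PySem.Set.contains pvPrefixes (String.ofList [c1, c2]) = true
        · rw [pvWalk_step Lw 0 _ c2 _ (by rw [ha2]; exact hq2), ha2, hl2]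
          by_cases hq3 : PySem.Set.contains pvPrefixes (String.ofList [c1, c2, c3]) = true
          · rw [pvWalk_step Lw _ _ c3 _ (by rw [ha3]; exact hq3), ha3, hl3]
            by_cases hq4 : PySem.Set.contains pvPrefixes (String.ofList [c1, c2, c3, c4]) = true
            · rw [pvWalk_step Lw _ _ c4 _ (by rw [ha4]; exact hq4), ha4, hl4,
                pvWalk_end Lw _ (String.ofList [c1, c2, c3, c4]) (by simp) rest]
            · have hd4 : ¬ (PySem.Set.contains pvRevSuf (String.ofList [c1, c2, c3, c4]) = true ∧ Lw - 4 ≥ 3) := by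
                intro hc
                exact hq4 (pvMemPrefix_of_append [c1, c2, c3, c4] [] (by simp) (by simpa using hc.1))
              rw [pvWalk_stop Lw _ _ c4 rest (by rw [ha4]; exact pvBool_false hq4), if_neg hd4]
          · have hd4 : ¬ (PySem.Set.contains pvRevSuf (String.ofList [c1, c2, c3, c4]) = true ∧ Lw - 4 ≥ 3) := by
              intro hc
              exact hq3 (pvMemPrefix_of_append [c1, c2, c3] [c4] (by simp) (by simpa using hc.1))
            have hd3 : ¬ (PySem.Set.contains pvRevSuf (String.ofList [c1, c2, c3]) = true ∧ Lw - 3 ≥ 3) := by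
              intro hc
              exact hq3 (pvMemPrefix_of_append [c1, c2, c3] [] (by simp) (by simpa using hc.1))
            rw [pvWalk_stop Lw _ _ c3 _ (by rw [ha3]; exact pvBool_false hq3), if_neg hd4, if_neg hd3]
        · have hd4 : ¬ (PySem.Set.contains pvRevSuf (String.ofList [c1, c2, c3, c4]) = true ∧ Lw - 4 ≥ 3) := by
            intro hc
            exact hq2 (pvMemPrefix_of_append [c1, c2] [c3, c4] (by simp) (by simpa using hc.1))
          have hd3 : ¬ (PySem.Set.contains pvRevSuf (String.ofList [c1, c2, c3]) = true ∧ Lw - 3 ≥ 3) := by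
            intro hc
            exact hq2 (pvMemPrefix_of_append [c1, c2] [c3] (by simp) (by simpa using hc.1))
          have hd2 : ¬ (PySem.Set.contains pvRevSuf (String.ofList [c1, c2]) = true ∧ Lw - 2 ≥ 3) := by
            intro hc
            exact hq2 (pvMemPrefix_of_append [c1, c2] [] (by simp) (by simpa using hc.1))
          rw [pvWalk_stop Lw 0 _ c2 _ (by rw [ha2]; exact pvBool_false hq2), if_neg hd4, if_neg hd3, if_neg hd2]
      · have hd4 : ¬ (PySem.Set.contains pvRevSuf (String.ofList [c1, c2, c3, c4]) = true ∧ Lw - 4 ≥ 3) := by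
          intro hc
          exact hq1 (pvMemPrefix_of_append [c1] [c2, c3, c4] (by simp) (by simpa using hc.1))
        have hd3 : ¬ (PySem.Set.contains pvRevSuf (String.ofList [c1, c2, c3]) = true ∧ Lw - 3 ≥ 3) := by
          intro hc
          exact hq1 (pvMemPrefix_of_append [c1] [c2, c3] (by simp) (by simpa using hc.1))
        have hd2 : ¬ (PySem.Set.contains pvRevSuf (String.ofList [c1, c2]) = true ∧ Lw - 2 ≥ 3) := by
          intro hc
          exact hq1 (pvMemPrefix_of_append [c1] [c2] (by simp) (by simpa using hc.1))
        rw [pvWalk_stop Lw 0 "" c1 _ (by rw [ha1]; exact pvBool_false hq1), if_neg hd4, if_neg hd3, if_neg hd2]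
    -- put both sides into the same nested-if form and compare
    rw [hrev, ht4, ht3, ht2]
    by_cases hC4 : String.ofList [c4, c3, c2, c1] ∈ pvG4 ∧ 3 ≤ (w.toList.length : Int) - ((4 : Nat) : Int)
    · have hN : pvWalkB Lw (c1 :: c2 :: c3 :: c4 :: rest) "" 0 = 4 := by
        rw [hbest, if_pos ⟨hM4.mpr hC4.1, by have h2 := hC4.2; omega⟩]
      rw [if_pos hC4, hN]
      norm_num
    · have hnc4 : ¬ (PySem.Set.contains pvRevSuf (String.ofList [c1, c2, c3, c4]) = true ∧ Lw - 4 ≥ 3) := by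
        intro hc
        exact hC4 ⟨hM4.mp hc.1, by have h2 := hc.2; omega⟩
      rw [if_neg hC4]
      by_cases hC3 : String.ofList [c3, c2, c1] ∈ pvG3 ∧ 3 ≤ (w.toList.length : Int) - ((3 : Nat) : Int)
      · have hN : pvWalkB Lw (c1 :: c2 :: c3 :: c4 :: rest) "" 0 = 3 := by
          rw [hbest, if_neg hnc4, if_pos ⟨hM3.mpr hC3.1, by have h2 := hC3.2; omega⟩]
        rw [if_pos hC3, hN]
        norm_num
      · have hnc3 : ¬ (PySem.Set.contains pvRevSuf (String.ofList [c1, c2, c3]) = true ∧ Lw - 3 ≥ 3) := by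
          intro hc
          exact hC3 ⟨hM3.mp hc.1, by have h2 := hc.2; omega⟩
        rw [if_neg hC3]
        by_cases hC2 : String.ofList [c2, c1] ∈ pvG2 ∧ 3 ≤ (w.toList.length : Int) - ((2 : Nat) : Int)
        · have hN : pvWalkB Lw (c1 :: c2 :: c3 :: c4 :: rest) "" 0 = 2 := by
            rw [hbest, if_neg hnc4, if_neg hnc3, if_pos ⟨hM2.mpr hC2.1, by have h2 := hC2.2; omega⟩]
          rw [if_pos hC2, hN]
          norm_num
        · have hnc2 : ¬ (PySem.Set.contains pvRevSuf (String.ofList [c1, c2]) = true ∧ Lw - 2 ≥ 3) := by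
            intro hc
            exact hC2 ⟨hM2.mp hc.1, by have h2 := hc.2; omega⟩
          have hN : pvWalkB Lw (c1 :: c2 :: c3 :: c4 :: rest) "" 0 = 0 := by
            rw [hbest, if_neg hnc4, if_neg hnc3, if_neg hnc2]
          rw [if_neg hC2, hN]
          simp [pvLoopA]
  · rw [if_neg h, if_neg h]

-- ===== VERDICT (by name: the statement is the Claim_ definition above) =====
theorem turkish_stemming_spec : Claim_equal_turkish_stemming := by
  intro text _
  unfold Spec_turkish_stemming turkish_stemming turkish_stemming_alt
  rw [List.map_congr_left (fun w _ => pvStem_eq w)]
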